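-- pv_equiv track=rewrite | github.com/sanjith05/Eugene-Bot | cogs/shop.py | _format_shop
-- ===== SOURCE A (Python) =====
-- from typing import Optional, List
--
-- def _format_shop(shop: dict) -> str:
--     colors = shop.get("color_roles", [])
--     specials = shop.get("specials", [])
--     lines: List[str] = []
--     if colors:
--         lines.append("Color Roles:")
--         for it in colors:
--             lines.append(f"• {it.get('name')} — {it.get('price')} coins")
--     if specials:
--         if lines:
--             lines.append("")
--         lines.append("Special Roles:")
--         for it in specials:
--             lines.append(f"• {it.get('name')} — {it.get('price')} coins")
--     return "\n".join(lines) or "No items yet."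
-- ===== SOURCE B (Python) =====
-- def _render(sections):
--     """Render sections back-to-front by recursion, concatenating strings directly."""
--     if not sections:
--         return ""
--     header, items = sections[0]
--     rest = _render(sections[1:])
--     if not items:
--         return rest
--     block = header
--     for it in items:
--         block += f"\n\u2022 {it.get('name')} \u2014 {it.get('price')} coins"
--     return block + ("\n\n" + rest if rest else "")
--
-- def _format_shop(shop: dict) -> str:
--     s = _render([("Color Roles:", shop.get("color_roles", [])),
--                  ("Special Roles:", shop.get("specials", []))])
--     return s if s else "No items yet."
-- ===== Notes on version B (the rewrite author's own statement) =====
-- stated objective: alternative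
-- what changed: Replaces A's flat list-of-lines accumulator joined by '\n' with a back-to-front recursion over a sections list that builds the output string directly by concatenation (no intermediate line list, no join, no blank-line sentinel).
import Mathlib
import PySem

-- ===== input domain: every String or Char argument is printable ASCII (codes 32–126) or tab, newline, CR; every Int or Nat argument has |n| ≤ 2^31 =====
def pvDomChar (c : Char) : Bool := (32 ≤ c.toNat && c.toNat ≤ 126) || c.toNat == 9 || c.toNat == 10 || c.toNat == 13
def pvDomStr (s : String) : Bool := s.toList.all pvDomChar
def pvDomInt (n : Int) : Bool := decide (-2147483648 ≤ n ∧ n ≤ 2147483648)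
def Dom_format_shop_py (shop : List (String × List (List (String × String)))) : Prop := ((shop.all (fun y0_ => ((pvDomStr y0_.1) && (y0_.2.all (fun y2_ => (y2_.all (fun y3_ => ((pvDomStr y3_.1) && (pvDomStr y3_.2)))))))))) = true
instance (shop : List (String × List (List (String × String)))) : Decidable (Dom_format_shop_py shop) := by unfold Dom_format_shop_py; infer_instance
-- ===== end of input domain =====

-- B drops A's list-of-lines + "\n".join: it renders the section list back-to-front by
-- recursion, concatenating the output string directly; objective: alternative decomposition.

-- dict.get (first match in the association list); shared by both ports
def pvLookup {ν : Type} (d : List (String × ν)) (k : String) : Option ν :=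
  (d.find? (fun p => p.1 == k)).map (·.2)

-- the f-string "• {it.get('name')} — {it.get('price')} coins" (str(None) = "None"); shared by both ports
def pvItemLine (it : List (String × String)) : String :=
  "• " ++ ((pvLookup it "name").getD "None") ++ " — " ++ ((pvLookup it "price").getD "None") ++ " coins"

-- ===== PORT A =====
def format_shop_py (shop : List (String × List (List (String × String)))) : String :=
  let colors := (pvLookup shop "color_roles").getD []
  let specials := (pvLookup shop "specials").getD []
  let lines : List String := []
  let lines := if colors.isEmpty then lines else
    colors.foldl (fun ls it => ls ++ [pvItemLine it]) (lines ++ ["Color Roles:"])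
  let lines := if specials.isEmpty then lines else
    specials.foldl (fun ls it => ls ++ [pvItemLine it])
      ((if lines.isEmpty then lines else lines ++ [""]) ++ ["Special Roles:"])
  let joined := PySem.Str.join "\n" lines
  if joined = "" then "No items yet." else joined

-- ===== PORT B =====
-- _render: back-to-front recursion over the sections, building the string by concatenation
def pvRender : List (String × List (List (String × String))) → String
  | [] => ""
  | (header, items) :: sections =>
    let rest := pvRender sections
    if items.isEmpty then rest
    else
      let block := items.foldl (fun b it => b ++ ("\n" ++ pvItemLine it)) header
      block ++ (if rest = "" then "" else "\n\n" ++ rest)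

def format_shop_py_alt (shop : List (String × List (List (String × String)))) : String :=
  let s := pvRender [("Color Roles:", (pvLookup shop "color_roles").getD []),
                     ("Special Roles:", (pvLookup shop "specials").getD [])]
  if s = "" then "No items yet." else s

-- ===== PRECONDITION & SPEC =====
def Spec_format_shop_py (shop : List (String × List (List (String × String)))) (out : String) : Prop := out = format_shop_py_alt shop
instance (shop : List (String × List (List (String × String)))) (out : String) : Decidable (Spec_format_shop_py shop out) := by unfold Spec_format_shop_py; infer_instance

-- ===== CLAIM (what is proved, stated in full; the proofs are below) =====
def Claim_equal_format_shop_py : Prop := ∀ (shop : List (String × List (List (String × String)))), Dom_format_shop_py shop → Spec_format_shop_py shop (format_shop_py shop)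

-- ===== LEMMAS AND PROOFS =====

-- A's line accumulator: foldl-append is map
theorem pv_foldl_append {α β : Type} (f : α → β) (l : List α) (acc : List β) :
    l.foldl (fun ls it => ls ++ [f it]) acc = acc ++ l.map f := by
  induction l generalizing acc with
  | nil => simp
  | cons a t ih => simp [List.foldl_cons, ih, List.append_assoc]

-- B's string accumulator, on the character level
theorem pv_foldl_str (l : List (List (String × String))) (acc : String) :
    (l.foldl (fun b it => b ++ ("\n" ++ pvItemLine it)) acc).toList
      = acc.toList ++ (l.map (fun it => '\n' :: (pvItemLine it).toList)).flatten := by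
  induction l generalizing acc with
  | nil => simp
  | cons a t ih => simp [List.foldl_cons, ih, List.append_assoc]

theorem pv_intercalate_cons₂ {α : Type} (sep : List α) (a b : List α) (t : List (List α)) :
    List.intercalate sep (a :: b :: t) = a ++ sep ++ List.intercalate sep (b :: t) := by
  simp [List.intercalate, List.intersperse, List.append_assoc]

-- "\n".join on a nonempty list, as head ++ flattened '\n'-prefixed tails
theorem pv_intercalate_cons (h : List Char) (ms : List (List Char)) :
    List.intercalate ['\n'] (h :: ms) = h ++ (ms.map (fun m => '\n' :: m)).flatten := by
  induction ms generalizing h with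
  | nil => simp [List.intercalate]
  | cons b t ih => rw [pv_intercalate_cons₂, ih b]; simp [List.append_assoc]

-- a string with a nonempty character list is not ""
theorem pv_ne_empty (s : String) (h : s.toList ≠ []) : s ≠ "" := by
  intro e; exact h (by simp [e])

-- the bridge: A's "\n".join of header :: formatted lines IS B's string foldl
theorem pv_join_block (h : String) (l : List (List (String × String))) :
    PySem.Str.join "\n" ([h] ++ l.map pvItemLine)
      = l.foldl (fun b it => b ++ ("\n" ++ pvItemLine it)) h := by
  apply String.toList_inj.mp
  rw [pv_foldl_str]
  simp only [PySem.Str.join, PySem.Chars.join]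
  rw [show ("\n".toList : List Char) = ['\n'] from rfl]
  simp [pv_intercalate_cons, List.map_map, Function.comp_def]

theorem format_shop_py_spec : Claim_equal_format_shop_py := by
  intro shop _
  unfold Spec_format_shop_py format_shop_py format_shop_py_alt
  set c := (pvLookup shop "color_roles").getD [] with hc
  set s := (pvLookup shop "specials").getD [] with hs
  clear_value c s
  cases c with
  | nil =>
    cases s with
    | nil => simp [pvRender, PySem.Str.join, PySem.Chars.join, List.intercalate]
    | cons b u =>
      simp only [pvRender, List.isEmpty_nil, if_true, List.isEmpty_cons, Bool.false_eq_true,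
        if_false, List.map_nil, List.nil_append, pv_foldl_append]
      rw [show (["Special Roles:"] ++ List.map pvItemLine (b :: u))
            = [("Special Roles:" : String)] ++ (b :: u).map pvItemLine from rfl,
        pv_join_block]
      simp
  | cons a t =>
    cases s with
    | nil =>
      simp only [pvRender, List.isEmpty_nil, if_true, List.isEmpty_cons, Bool.false_eq_true,
        if_false, List.nil_append, pv_foldl_append]
      rw [show (["Color Roles:"] ++ List.map pvItemLine (a :: t))
            = [("Color Roles:" : String)] ++ (a :: t).map pvItemLine from rfl,
        pv_join_block]
      simp
    | cons b u =>
      simp only [pvRender, if_true, List.isEmpty_cons, Bool.false_eq_true,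
        if_false, List.nil_append, pv_foldl_append]
      have hrest : (List.foldl (fun b it => b ++ ("\n" ++ pvItemLine it)) "Special Roles:" (b :: u) ++ "" : String) ≠ "" := by
        apply pv_ne_empty
        simp [pv_foldl_str]
      rw [if_neg hrest]
      have hjoin : (PySem.Str.join "\n"
            ((["Color Roles:"] ++ List.map pvItemLine (a :: t) ++ [""]) ++
              ["Special Roles:"] ++ List.map pvItemLine (b :: u))) =
          List.foldl (fun b it => b ++ ("\n" ++ pvItemLine it)) "Color Roles:" (a :: t) ++
            ("\n\n" ++ (List.foldl (fun b it => b ++ ("\n" ++ pvItemLine it)) "Special Roles:" (b :: u) ++ "")) := by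
        apply String.toList_inj.mp
        simp only [PySem.Str.join, PySem.Chars.join]
        rw [show ("\n".toList : List Char) = ['\n'] from rfl]
        have e : List.map String.toList
              ((["Color Roles:"] ++ List.map pvItemLine (a :: t) ++ [""]) ++
                ["Special Roles:"] ++ List.map pvItemLine (b :: u))
            = "Color Roles:".toList ::
              (((a :: t).map (fun it => (pvItemLine it).toList) ++ [[]]) ++
                "Special Roles:".toList :: (b :: u).map (fun it => (pvItemLine it).toList)) := by
          simp [List.map_map, Function.comp_def]
        rw [e, pv_intercalate_cons]
        simp [pv_foldl_str, List.map_map, Function.comp_def, List.append_assoc,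
          String.toList_append]
      simp only [List.cons_append, List.isEmpty_cons, Bool.false_eq_true, if_false,
        List.nil_append, List.append_assoc] at hjoin ⊢
      rw [hjoin]
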